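-- pv_equiv track=rewrite | github.com/DinoZawrik/Legal-RAG | chainlit_app.py | _translate_law_name
-- ===== SOURCE A (Python) =====
-- _LAW_NAME_MAP = {
--     "Consumer Protection Law": "Закон о защите прав потребителей",
--     "consumer_protection_law": "Закон о защите прав потребителей",
--     "Labor Code Excerpt": "Трудовой кодекс РФ",
--     "labor_code_excerpt": "Трудовой кодекс РФ",
--     "Labor Code": "Трудовой кодекс РФ",
--     "Civil Code": "Гражданский кодекс РФ",
--     "Criminal Code": "Уголовный кодекс РФ",
--     "Tax Code": "Налоговый кодекс РФ",
--     "Family Code": "Семейный кодекс РФ",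
--     # PDF filenames
--     "skodeksrf.pdf": "Семейный кодекс РФ",
--     "skodeksrf": "Семейный кодекс РФ",
--     "garant_grajdansky_kodeks_rf.pdf": "Гражданский кодекс РФ",
--     "garant_grajdansky_kodeks_rf": "Гражданский кодекс РФ",
--     "grazhdanskij_kodeks_rf.pdf": "Гражданский кодекс РФ",
--     "grazhdanskij_kodeks_rf": "Гражданский кодекс РФ",
--     "semejnyj_kodeks_rf.pdf": "Семейный кодекс РФ",
--     "semejnyj_kodeks_rf": "Семейный кодекс РФ",
--     "labor_code_excerpt.pdf": "Трудовой кодекс РФ",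
--     "trudovoj_kodeks_rf": "Трудовой кодекс РФ",
--     "trudovoj_kodeks_rf.pdf": "Трудовой кодекс РФ",
--     "zakon_o_zashite_prav_potrebitelej": "Закон о защите прав потребителей",
--     "consumer_protection_law.pdf": "Закон о защите прав потребителей",
--     "zhilishchnyj_kodeks_rf": "Жилищный кодекс РФ",
-- }
--
-- def _translate_law_name(name: str) -> str:
--     """Translate English law name to Russian if mapping exists."""
--     if not name:
--         return name
--     # Exact match
--     if name in _LAW_NAME_MAP:
--         return _LAW_NAME_MAP[name]
--     # Case-insensitive match
--     name_lower = name.lower()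
--     for eng, rus in _LAW_NAME_MAP.items():
--         if eng.lower() == name_lower:
--             return rus
--     # Strip extensions and retry
--     base = name.replace('.txt', '').replace('.pdf', '')
--     base_lower = base.lower()
--     for eng, rus in _LAW_NAME_MAP.items():
--         eng_base = eng.replace('.txt', '').replace('.pdf', '').lower()
--         if eng_base == base_lower:
--             return rus
--     # Prefix match: filename may have hash suffix like "labor_code_excerpt_97c9cb59"
--     for eng, rus in _LAW_NAME_MAP.items():
--         eng_base = eng.replace('.txt', '').replace('.pdf', '').lower()
--         if len(eng_base) > 3 and base_lower.startswith(eng_base):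
--             return rus
--     return name
-- ===== SOURCE B (Python) =====
-- # B: single fused pass with a best-tier accumulator replaces A's four staged scans of the map.
-- _LAW_NAME_MAP = {
--     "Consumer Protection Law": "Закон о защите прав потребителей",
--     "consumer_protection_law": "Закон о защите прав потребителей",
--     "Labor Code Excerpt": "Трудовой кодекс РФ",
--     "labor_code_excerpt": "Трудовой кодекс РФ",
--     "Labor Code": "Трудовой кодекс РФ",
--     "Civil Code": "Гражданский кодекс РФ",
--     "Criminal Code": "Уголовный кодекс РФ",
--     "Tax Code": "Налоговый кодекс РФ",
--     "Family Code": "Семейный кодекс РФ",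
--     "skodeksrf.pdf": "Семейный кодекс РФ",
--     "skodeksrf": "Семейный кодекс РФ",
--     "garant_grajdansky_kodeks_rf.pdf": "Гражданский кодекс РФ",
--     "garant_grajdansky_kodeks_rf": "Гражданский кодекс РФ",
--     "grazhdanskij_kodeks_rf.pdf": "Гражданский кодекс РФ",
--     "grazhdanskij_kodeks_rf": "Гражданский кодекс РФ",
--     "semejnyj_kodeks_rf.pdf": "Семейный кодекс РФ",
--     "semejnyj_kodeks_rf": "Семейный кодекс РФ",
--     "labor_code_excerpt.pdf": "Трудовой кодекс РФ",
--     "trudovoj_kodeks_rf": "Трудовой кодекс РФ",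
--     "trudovoj_kodeks_rf.pdf": "Трудовой кодекс РФ",
--     "zakon_o_zashite_prav_potrebitelej": "Закон о защите прав потребителей",
--     "consumer_protection_law.pdf": "Закон о защите прав потребителей",
--     "zhilishchnyj_kodeks_rf": "Жилищный кодекс РФ",
-- }
--
--
-- def _translate_law_name(name: str) -> str:
--     """Translate English law name to Russian if mapping exists.
--
--     One pass over the map with a best-tier accumulator: tier 0 = exact
--     (return immediately), tier 1 = case-insensitive, tier 2 =
--     extension-stripped, tier 3 = prefix; the first entry achieving the
--     lowest tier wins.
--     """
--     if not name:
--         return name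
--     low = name.lower()
--     base = name.replace('.txt', '').replace('.pdf', '').lower()
--     best_tier = 4
--     best_val = name
--     for eng, rus in _LAW_NAME_MAP.items():
--         el = eng.lower()
--         eb = eng.replace('.txt', '').replace('.pdf', '').lower()
--         if eng == name:
--             return rus
--         if el == low:
--             if 1 < best_tier:
--                 best_tier, best_val = 1, rus
--         elif eb == base:
--             if 2 < best_tier:
--                 best_tier, best_val = 2, rus
--         elif len(eb) > 3 and base.startswith(eb):
--             if 3 < best_tier:
--                 best_tier, best_val = 3, rus
--     return best_val
-- ===== Notes on version B (the rewrite author's own statement) =====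
-- stated objective: alternative
-- what changed: A runs four staged scans over the law-name map (exact, case-insensitive, extension-stripped, prefix), each restarting from the top; B makes a single pass over the map, assigns each entry one match tier (0-3) and keeps the first entry achieving the lowest tier seen so far, breaking on an exact hit.
import Mathlib
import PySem

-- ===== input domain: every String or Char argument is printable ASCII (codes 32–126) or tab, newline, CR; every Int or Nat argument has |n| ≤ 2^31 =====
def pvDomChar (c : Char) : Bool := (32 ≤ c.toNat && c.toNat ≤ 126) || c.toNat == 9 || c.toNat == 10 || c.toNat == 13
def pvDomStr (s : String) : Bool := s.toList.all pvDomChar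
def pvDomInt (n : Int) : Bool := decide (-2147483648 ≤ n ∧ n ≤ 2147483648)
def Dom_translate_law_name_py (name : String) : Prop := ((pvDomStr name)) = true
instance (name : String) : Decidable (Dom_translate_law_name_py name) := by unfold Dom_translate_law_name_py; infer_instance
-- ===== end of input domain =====

set_option maxHeartbeats 1000000

-- B replaces A's four staged scans of the law-name map by a single pass keeping the
-- first entry of lowest match tier (alternative decomposition; same result).

def lawNameMap : List (String × String) := [
  ("Consumer Protection Law", "Закон о защите прав потребителей"),
  ("consumer_protection_law", "Закон о защите прав потребителей"),
  ("Labor Code Excerpt", "Трудовой кодекс РФ"),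
  ("labor_code_excerpt", "Трудовой кодекс РФ"),
  ("Labor Code", "Трудовой кодекс РФ"),
  ("Civil Code", "Гражданский кодекс РФ"),
  ("Criminal Code", "Уголовный кодекс РФ"),
  ("Tax Code", "Налоговый кодекс РФ"),
  ("Family Code", "Семейный кодекс РФ"),
  ("skodeksrf.pdf", "Семейный кодекс РФ"),
  ("skodeksrf", "Семейный кодекс РФ"),
  ("garant_grajdansky_kodeks_rf.pdf", "Гражданский кодекс РФ"),
  ("garant_grajdansky_kodeks_rf", "Гражданский кодекс РФ"),
  ("grazhdanskij_kodeks_rf.pdf", "Гражданский кодекс РФ"),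
  ("grazhdanskij_kodeks_rf", "Гражданский кодекс РФ"),
  ("semejnyj_kodeks_rf.pdf", "Семейный кодекс РФ"),
  ("semejnyj_kodeks_rf", "Семейный кодекс РФ"),
  ("labor_code_excerpt.pdf", "Трудовой кодекс РФ"),
  ("trudovoj_kodeks_rf", "Трудовой кодекс РФ"),
  ("trudovoj_kodeks_rf.pdf", "Трудовой кодекс РФ"),
  ("zakon_o_zashite_prav_potrebitelej", "Закон о защите прав потребителей"),
  ("consumer_protection_law.pdf", "Закон о защите прав потребителей"),
  ("zhilishchnyj_kodeks_rf", "Жилищный кодекс РФ")]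


-- dict lookup on an insertion-ordered association list (first match)
def lookupFirst : List (String × String) → String → Option String
  | [], _ => none
  | (a, b) :: t, k => if a == k then some b else lookupFirst t k

-- s.replace('.txt','').replace('.pdf','')   (shared subexpression of both Pythons)
def stripExt (s : String) : String := PySem.Str.replace (PySem.Str.replace s ".txt" "") ".pdf" ""

-- ===== PORT A =====
def translate_law_name_py (name : String) : String :=
  if name == "" then name
  else
    (lookupFirst lawNameMap name).getD
      (((lawNameMap.find? (fun e =>
          PySem.Str.lower e.1 == PySem.Str.lower name)).map (·.2)).getD
        (((lawNameMap.find? (fun e =>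
            PySem.Str.lower (stripExt e.1) == PySem.Str.lower (stripExt name))).map (·.2)).getD
          (((lawNameMap.find? (fun e =>
              decide (3 < PySem.Str.len (PySem.Str.lower (stripExt e.1))) &&
                PySem.Str.startswith (PySem.Str.lower (stripExt name))
                  (PySem.Str.lower (stripExt e.1)))).map (·.2)).getD
            name)))

-- ===== PORT B =====
-- the loop of Source B: best_tier/best_val accumulator; tier 0 returns at once,
-- tiers 1-3 update the accumulator when strictly better
def scanTiers (name low base : String) : List (String × String) → Nat → String → String
  | [], _, bv => bv
  | e :: rest, bt, bv =>
    let el := PySem.Str.lower e.1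
    let eb := PySem.Str.lower (stripExt e.1)
    if e.1 == name then e.2
    else if el == low then
      if 1 < bt then scanTiers name low base rest 1 e.2 else scanTiers name low base rest bt bv
    else if eb == base then
      if 2 < bt then scanTiers name low base rest 2 e.2 else scanTiers name low base rest bt bv
    else if decide (3 < PySem.Str.len eb) && PySem.Str.startswith base eb then
      if 3 < bt then scanTiers name low base rest 3 e.2 else scanTiers name low base rest bt bv
    else scanTiers name low base rest bt bv

def translate_law_name_py_alt (name : String) : String :=
  if name == "" then name
  else
    scanTiers name (PySem.Str.lower name) (PySem.Str.lower (stripExt name)) lawNameMap 4 name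

-- ===== PRECONDITION & SPEC =====
def Spec_translate_law_name_py (name : String) (out : String) : Prop := out = translate_law_name_py_alt name
instance (name : String) (out : String) : Decidable (Spec_translate_law_name_py name out) := by unfold Spec_translate_law_name_py; infer_instance

-- ===== CLAIM (what is proved, stated in full; the proofs are below) =====
def Claim_equal_translate_law_name_py : Prop := ∀ (name : String), Dom_translate_law_name_py name → Spec_translate_law_name_py name (translate_law_name_py name)

-- ===== LEMMAS AND PROOFS =====

-- the four stage conditions of A, indexed by tier
def condT (name low base : String) : Nat → (String × String) → Bool
  | 0, e => e.1 == name
  | 1, e => PySem.Str.lower e.1 == low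
  | 2, e => PySem.Str.lower (stripExt e.1) == base
  | 3, e => decide (3 < PySem.Str.len (PySem.Str.lower (stripExt e.1))) &&
              PySem.Str.startswith base (PySem.Str.lower (stripExt e.1))
  | _, _ => false

-- first match of stage j over l
def stageF (name low base : String) (j : Nat) (l : List (String × String)) : Option String :=
  (l.find? (condT name low base j)).map (·.2)

-- nested getD over a list of stages (A's staged structure)
def nest (name low base : String) (l : List (String × String)) : List Nat → String → String
  | [], bv => bv
  | j :: js, bv => (stageF name low base j l).getD (nest name low base l js bv)

lemma lookupFirst_eq_find (d : List (String × String)) (s : String) :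
    lookupFirst d s = (d.find? (fun e => e.1 == s)).map (·.2) := by
  induction d with
  | nil => rfl
  | cons e t ih =>
    obtain ⟨a, b⟩ := e
    by_cases h : a == s
    · simp [lookupFirst, h]
    · simp only [lookupFirst, List.find?_cons]
      rw [if_neg (by simpa using h)]
      simpa [h] using ih

lemma nest_nil (name low base : String) (js : List Nat) (bv : String) :
    nest name low base [] js bv = bv := by
  induction js with
  | nil => rfl
  | cons j js ih => simp [nest, stageF, ih]

lemma nest_hit (name low base : String) (e : String × String) (t : List (String × String))
    (j : Nat) (js : List Nat) (bv : String) (h : condT name low base j e = true) :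
    nest name low base (e :: t) (j :: js) bv = e.2 := by
  simp [nest, stageF, List.find?_cons_of_pos h]

lemma nest_skip (name low base : String) (e : String × String) (t : List (String × String))
    (js : List Nat) (bv : String) (h : ∀ j ∈ js, condT name low base j e = false) :
    nest name low base (e :: t) js bv = nest name low base t js bv := by
  induction js generalizing bv with
  | nil => rfl
  | cons j js ih =>
    simp only [nest, stageF, List.find?_cons_of_neg (by simpa using h j (by simp))]
    rw [ih _ (fun j hj => h j (by simp [hj]))]

lemma nest_append (name low base : String) (l : List (String × String))
    (js ks : List Nat) (bv : String) :
    nest name low base l (js ++ ks) bv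
      = nest name low base l js (nest name low base l ks bv) := by
  induction js with
  | nil => rfl
  | cons j js ih => simp [nest, ih]

-- the fused single pass equals the staged nest over tiers 0..bt-1
lemma scan_eq_nest (name low base : String) (l : List (String × String)) :
    ∀ (bt : Nat) (bv : String), 1 ≤ bt → bt ≤ 4 →
      scanTiers name low base l bt bv = nest name low base l (List.range bt) bv := by
  induction l with
  | nil => intro bt bv _ _; rw [nest_nil]; rfl
  | cons e t ih =>
    intro bt bv hbt1 hbt4
    cases h0 : e.1 == name with
    | true =>
      obtain ⟨b, rfl⟩ : ∃ b, bt = b + 1 := ⟨bt - 1, (Nat.succ_pred_eq_of_pos hbt1).symm⟩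
      rw [List.range_succ_eq_map,
        nest_hit name low base e t 0 _ bv (by exact h0)]
      simp only [scanTiers]
      rw [h0]
      simp
    | false =>
    cases h1 : PySem.Str.lower e.1 == low with
    | true =>
      have hL : scanTiers name low base (e :: t) bt bv =
          if 1 < bt then scanTiers name low base t 1 e.2
          else scanTiers name low base t bt bv := by
        simp only [scanTiers]
        rw [h0, h1]
        simp
      rw [hL]
      by_cases hb : 1 < bt
      · rw [if_pos hb, ih 1 e.2 le_rfl (by omega)]
        interval_cases bt
        · rw [show List.range 2 = [0] ++ 1 :: [] from by decide, nest_append,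
            nest_hit name low base e t 1 _ _ (by exact h1),
            nest_skip name low base e t [0] _ (by
              intro j hj; fin_cases hj; exact h0),
            show List.range 1 = [0] from by decide]
        · rw [show List.range 3 = [0] ++ 1 :: [2] from by decide, nest_append,
            nest_hit name low base e t 1 _ _ (by exact h1),
            nest_skip name low base e t [0] _ (by
              intro j hj; fin_cases hj; exact h0),
            show List.range 1 = [0] from by decide]
        · rw [show List.range 4 = [0] ++ 1 :: [2, 3] from by decide, nest_append,
            nest_hit name low base e t 1 _ _ (by exact h1),
            nest_skip name low base e t [0] _ (by
              intro j hj; fin_cases hj; exact h0),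
            show List.range 1 = [0] from by decide]
      · rw [if_neg hb]
        have hbt : bt = 1 := by omega
        subst hbt
        rw [ih 1 bv le_rfl (by omega),
          nest_skip name low base e t (List.range 1) bv (by
            intro j hj; fin_cases hj; exact h0)]
    | false =>
    cases h2 : PySem.Str.lower (stripExt e.1) == base with
    | true =>
      have hL : scanTiers name low base (e :: t) bt bv =
          if 2 < bt then scanTiers name low base t 2 e.2
          else scanTiers name low base t bt bv := by
        simp only [scanTiers]
        rw [h0, h1, h2]
        simp
      rw [hL]
      by_cases hb : 2 < bt
      · rw [if_pos hb, ih 2 e.2 (by omega) (by omega)]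
        interval_cases bt
        · rw [show List.range 3 = [0, 1] ++ 2 :: [] from by decide, nest_append,
            nest_hit name low base e t 2 _ _ (by exact h2),
            nest_skip name low base e t [0, 1] _ (by
              intro j hj; fin_cases hj
              · exact h0
              · exact h1),
            show List.range 2 = [0, 1] from by decide]
        · rw [show List.range 4 = [0, 1] ++ 2 :: [3] from by decide, nest_append,
            nest_hit name low base e t 2 _ _ (by exact h2),
            nest_skip name low base e t [0, 1] _ (by
              intro j hj; fin_cases hj
              · exact h0
              · exact h1),
            show List.range 2 = [0, 1] from by decide]
      · rw [if_neg hb, ih bt bv hbt1 hbt4]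
        refine (nest_skip name low base e t (List.range bt) bv ?_).symm
        intro j hj
        have hj' : j < 2 := by have := List.mem_range.mp hj; omega
        interval_cases j
        · exact h0
        · exact h1
    | false =>
    cases h3 : decide (3 < PySem.Str.len (PySem.Str.lower (stripExt e.1))) &&
        PySem.Str.startswith base (PySem.Str.lower (stripExt e.1)) with
    | true =>
      have hL : scanTiers name low base (e :: t) bt bv =
          if 3 < bt then scanTiers name low base t 3 e.2
          else scanTiers name low base t bt bv := by
        simp only [scanTiers]
        rw [h0, h1, h2, h3]
        simp
      rw [hL]
      by_cases hb : 3 < bt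
      · rw [if_pos hb, ih 3 e.2 (by omega) (by omega)]
        have hbt : bt = 4 := by omega
        subst hbt
        rw [show List.range 4 = [0, 1, 2] ++ 3 :: [] from by decide, nest_append,
          nest_hit name low base e t 3 _ _ (by exact h3),
          nest_skip name low base e t [0, 1, 2] _ (by
            intro j hj; fin_cases hj
            · exact h0
            · exact h1
            · exact h2),
          show List.range 3 = [0, 1, 2] from by decide]
      · rw [if_neg hb, ih bt bv hbt1 hbt4]
        refine (nest_skip name low base e t (List.range bt) bv ?_).symm
        intro j hj
        have hj' : j < 3 := by have := List.mem_range.mp hj; omega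
        interval_cases j
        · exact h0
        · exact h1
        · exact h2
    | false =>
      have hL : scanTiers name low base (e :: t) bt bv =
          scanTiers name low base t bt bv := by
        simp only [scanTiers]
        rw [h0, h1, h2, h3]
        simp
      rw [hL, ih bt bv hbt1 hbt4]
      refine (nest_skip name low base e t (List.range bt) bv ?_).symm
      intro j hj
      have hj' : j < 4 := by have := List.mem_range.mp hj; omega
      interval_cases j
      · exact h0
      · exact h1
      · exact h2
      · exact h3

lemma nest_unfold (name low base : String) (l : List (String × String)) (bv : String) :
    nest name low base l [0, 1, 2, 3] bv
      = ((l.find? (fun e => e.1 == name)).map (·.2)).getD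
          (((l.find? (fun e => PySem.Str.lower e.1 == low)).map (·.2)).getD
            (((l.find? (fun e => PySem.Str.lower (stripExt e.1) == base)).map (·.2)).getD
              (((l.find? (fun e =>
                  decide (3 < PySem.Str.len (PySem.Str.lower (stripExt e.1))) &&
                    PySem.Str.startswith base (PySem.Str.lower (stripExt e.1)))).map (·.2)).getD
                bv))) := rfl

-- ===== VERDICT (by name: the statement is the Claim_ definition above) =====
theorem translate_law_name_py_spec : Claim_equal_translate_law_name_py := by
  intro name _
  show translate_law_name_py name = translate_law_name_py_alt name
  unfold translate_law_name_py translate_law_name_py_alt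
  by_cases h : (name == "") = true
  · rw [if_pos h, if_pos h]
  · rw [if_neg h, if_neg h,
      scan_eq_nest name (PySem.Str.lower name) (PySem.Str.lower (stripExt name))
        lawNameMap 4 name (by omega) (by omega),
      show List.range 4 = [0, 1, 2, 3] from by decide,
      nest_unfold, lookupFirst_eq_find]
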